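-- pv_equiv track=rewrite | github.com/vyalsgh-tech/my-timetable-next | tools/step22_repair_after_step21_failure.py | strip_css_artifacts
-- ===== SOURCE A (Python) =====
-- def strip_css_artifacts(text):
--     lines = text.splitlines()
--     out = []
--     skip = False
--     for i, line in enumerate(lines):
--         s = line.strip()
--         if 'div[data-testid="stButton"]' in line and '{' in line:
--             skip = True
--             continue
--         if '.mdgo-strike' in line and '{' in line:
--             skip = True
--             continue
--         if skip:
--             if s in ('}', '}}') or '</style>' in s:
--                 skip = False
--             continue
--         bad = ['white-space: nowrap !important', 'word-break: keep-all !important', 'min-width:', 'padding-left:', 'padding-right:', 'text-decoration-line:', 'text-decoration-thickness:', 'text-decoration-color:', 'opacity:']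
--         if any(x in line for x in bad):
--             continue
--         out.append(line)
--     return '\n'.join(out) + '\n'
-- ===== SOURCE B (Python) =====
-- BAD_PROPS = ('white-space: nowrap !important', 'word-break: keep-all !important',
--              'min-width:', 'padding-left:', 'padding-right:', 'text-decoration-line:',
--              'text-decoration-thickness:', 'text-decoration-color:', 'opacity:')
--
--
-- def _is_block_start(line):
--     return ('{' in line and
--             ('div[data-testid="stButton"]' in line or '.mdgo-strike' in line))
--
--
-- def _is_terminator(line):
--     s = line.strip()
--     return s in ('}', '}}') or '</style>' in s
--
--
-- def _after_terminator(lines):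
--     # suffix strictly after the block terminator (block-start lines are not terminators)
--     for k, ln in enumerate(lines):
--         if not _is_block_start(ln) and _is_terminator(ln):
--             return lines[k + 1:]
--     return []
--
--
-- def _outside_blocks(lines):
--     # stage 1: splice together the segments lying outside the artifact blocks
--     out = []
--     while lines:
--         j = next((k for k, ln in enumerate(lines) if _is_block_start(ln)), None)
--         if j is None:
--             out.extend(lines)
--             break
--         out.extend(lines[:j])
--         lines = _after_terminator(lines[j + 1:])
--     return out
--
--
-- def strip_css_artifacts(text):
--     kept = _outside_blocks(text.splitlines())
--     kept = [ln for ln in kept if not any(x in ln for x in BAD_PROPS)]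
--     return '\n'.join(kept) + '\n'
-- ===== Notes on version B (the rewrite author's own statement) =====
-- stated objective: alternative
-- what changed: A's single enumerate-pass with a persistent boolean skip flag and inline property filtering is replaced by two staged passes: a splicer that repeatedly searches (via next/enumerate) for the next block-start line and its terminator, concatenating the segments outside the blocks, followed by a separate list-comprehension pass that drops bad-property lines.
import Mathlib
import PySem

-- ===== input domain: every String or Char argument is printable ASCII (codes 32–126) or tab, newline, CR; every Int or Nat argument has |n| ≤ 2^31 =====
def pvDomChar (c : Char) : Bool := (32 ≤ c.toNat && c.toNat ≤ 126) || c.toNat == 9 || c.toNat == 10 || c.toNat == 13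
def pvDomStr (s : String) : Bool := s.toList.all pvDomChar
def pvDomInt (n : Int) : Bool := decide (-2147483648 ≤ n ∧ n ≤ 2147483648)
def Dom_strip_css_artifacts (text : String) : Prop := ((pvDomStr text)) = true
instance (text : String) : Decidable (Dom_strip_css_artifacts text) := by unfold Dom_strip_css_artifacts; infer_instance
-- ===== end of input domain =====

-- B replaces A's single-pass boolean skip-flag state machine by two staged passes: a splicer
-- that searches for each block start and its terminator and concatenates the outside segments,
-- then a separate filter pass removing bad-property lines (objective: alternative).

-- ===== PORT A =====
-- A's bad-property list
def pvBadA : List String :=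
  ["white-space: nowrap !important", "word-break: keep-all !important", "min-width:",
   "padding-left:", "padding-right:", "text-decoration-line:", "text-decoration-thickness:",
   "text-decoration-color:", "opacity:"]

-- A's loop body: state (out, skip), one Python loop iteration (the enumerate index is unused in A)
def pvStepA (st : List String × Bool) (line : String) : List String × Bool :=
  let s := PySem.Str.strip line
  if PySem.Str.isIn "div[data-testid=\"stButton\"]" line && PySem.Str.isIn "{" line then
    (st.1, true)
  else if PySem.Str.isIn ".mdgo-strike" line && PySem.Str.isIn "{" line then
    (st.1, true)
  else if st.2 then
    (if (s == "}" || s == "}}") || PySem.Str.isIn "</style>" s then (st.1, false) else (st.1, true))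
  else if pvBadA.any (fun x => PySem.Str.isIn x line) then
    st
  else
    (st.1 ++ [line], st.2)

def strip_css_artifacts (text : String) : String :=
  let lines := PySem.Str.splitlines text
  let res := List.foldl pvStepA ([], false) lines
  PySem.Str.join "\n" res.1 ++ "\n"

-- ===== PORT B =====
def pvBadB : List String :=
  ["white-space: nowrap !important", "word-break: keep-all !important", "min-width:",
   "padding-left:", "padding-right:", "text-decoration-line:", "text-decoration-thickness:",
   "text-decoration-color:", "opacity:"]

-- B's _is_block_start
def pvIsBlockStart (line : String) : Bool :=
  PySem.Str.isIn "{" line &&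
    (PySem.Str.isIn "div[data-testid=\"stButton\"]" line || PySem.Str.isIn ".mdgo-strike" line)

-- B's _is_terminator
def pvIsTerminator (line : String) : Bool :=
  let s := PySem.Str.strip line
  (s == "}" || s == "}}") || PySem.Str.isIn "</style>" s

-- B's _after_terminator: the enumerate-with-return loop is this structural recursion
def pvAfterTerminator : List String → List String
  | [] => []
  | ln :: rest =>
    if !pvIsBlockStart ln && pvIsTerminator ln then rest else pvAfterTerminator rest

-- needed for the termination of pvOutsideBlocks (and of the proof-side pvKept below)
lemma pvAfterTerminator_length (ls : List String) :
    (pvAfterTerminator ls).length ≤ ls.length := by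
  induction ls with
  | nil => simp [pvAfterTerminator]
  | cons ln rest ih =>
    simp only [pvAfterTerminator]
    split
    · simp
    · exact Nat.le_trans ih (Nat.le_succ _)

-- B's _outside_blocks: while-loop with accumulator out; next(...) is List.findIdx?
def pvOutsideBlocks (out : List String) (lines : List String) : List String :=
  match h : List.findIdx? pvIsBlockStart lines with
  | none => out ++ lines
  | some j => pvOutsideBlocks (out ++ lines.take j) (pvAfterTerminator (lines.drop (j + 1)))
termination_by lines.length
decreasing_by
  have hne : lines ≠ [] := by
    intro he; rw [he] at h; simp at h
  have h1 : 1 ≤ lines.length := by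
    cases lines with
    | nil => exact absurd rfl hne
    | cons a t => simp
  have h2 := pvAfterTerminator_length (lines.drop (j + 1))
  have h3 : (lines.drop (j + 1)).length = lines.length - (j + 1) := by simp
  omega

def strip_css_artifacts_alt (text : String) : String :=
  let kept := pvOutsideBlocks [] (PySem.Str.splitlines text)
  let kept := kept.filter (fun ln => !(pvBadB.any (fun x => PySem.Str.isIn x ln)))
  PySem.Str.join "\n" kept ++ "\n"

-- ===== PRECONDITION & SPEC =====
def Spec_strip_css_artifacts (text : String) (out : String) : Prop := out = strip_css_artifacts_alt text
instance (text : String) (out : String) : Decidable (Spec_strip_css_artifacts text out) := by unfold Spec_strip_css_artifacts; infer_instance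

-- ===== CLAIM (what is proved, stated in full; the proofs are below) =====
def Claim_equal_strip_css_artifacts : Prop := ∀ (text : String), Dom_strip_css_artifacts text → Spec_strip_css_artifacts text (strip_css_artifacts text)

-- ===== LEMMAS AND PROOFS =====

-- abbreviations for A's tests (proof-side only)
def pvC1 (line : String) : Bool :=
  PySem.Str.isIn "div[data-testid=\"stButton\"]" line && PySem.Str.isIn "{" line
def pvC2 (line : String) : Bool :=
  PySem.Str.isIn ".mdgo-strike" line && PySem.Str.isIn "{" line
def pvBad (line : String) : Bool := pvBadA.any (fun x => PySem.Str.isIn x line)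

-- proof-side bridge: the lines outside artifact blocks, as a one-line recursion
def pvKept : List String → List String
  | [] => []
  | ln :: rest =>
    if pvIsBlockStart ln then pvKept (pvAfterTerminator rest) else ln :: pvKept rest
termination_by ls => ls.length
decreasing_by
  · have := pvAfterTerminator_length rest; simp; omega
  · simp

lemma pvStepA_eq (st : List String × Bool) (line : String) :
    pvStepA st line =
      (if pvC1 line then (st.1, true)
       else if pvC2 line then (st.1, true)
       else if st.2 then (if pvIsTerminator line then (st.1, false) else (st.1, true))
       else if pvBad line then st
       else (st.1 ++ [line], st.2)) := rfl

-- A's two block-start tests, taken together, are B's single _is_block_start test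
lemma pv_start_eq (line : String) :
    (pvC1 line || pvC2 line) = pvIsBlockStart line := by
  unfold pvC1 pvC2 pvIsBlockStart
  cases PySem.Str.isIn "{" line <;>
    cases PySem.Str.isIn "div[data-testid=\"stButton\"]" line <;>
    cases PySem.Str.isIn ".mdgo-strike" line <;> rfl

def pvFilterBad (ls : List String) : List String := ls.filter (fun ln => !pvBad ln)

-- B's stage 1 equals the bridge recursion
lemma pvOutsideBlocks_eq : ∀ n (lines : List String), lines.length ≤ n →
    ∀ out, pvOutsideBlocks out lines = out ++ pvKept lines := by
  intro n
  induction n with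
  | zero =>
    intro lines hl out
    have : lines = [] := List.eq_nil_of_length_eq_zero (Nat.le_zero.mp hl)
    subst this
    rw [pvOutsideBlocks, pvKept]
    simp
  | succ m ih =>
    intro lines hl out
    rw [pvOutsideBlocks]
    split
    next h =>
      -- no block start: pvKept lines = lines
      have hall : ∀ l ∈ lines, pvIsBlockStart l = false := by
        intro l hm
        have := List.findIdx?_eq_none_iff.mp h
        simpa using this l hm
      congr 1
      clear h hl ih
      induction lines with
      | nil => rw [pvKept]
      | cons a t iht =>
        rw [pvKept, if_neg]
        · exact congrArg (List.cons a) (iht (fun l hm => hall l (List.mem_cons_of_mem a hm)))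
        · simp [hall a (by simp)]
    next j h =>
      -- first block start at j
      have hlt : j < lines.length := List.findIdx?_eq_some_iff_findIdx_eq.mp h |>.1
      have hlen : (pvAfterTerminator (lines.drop (j + 1))).length ≤ m := by
        have := pvAfterTerminator_length (lines.drop (j + 1))
        have h3 : (lines.drop (j + 1)).length = lines.length - (j + 1) := by simp
        omega
      rw [ih _ hlen]
      rw [List.append_assoc]
      congr 1
      -- pvKept lines = take j ++ pvKept (afterTerm (drop (j+1)))
      clear ih hl hlen
      induction lines generalizing j with
      | nil => simp at hlt
      | cons a t iht =>
        rw [List.findIdx?_cons] at h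
        by_cases ha : pvIsBlockStart a = true
        · rw [if_pos ha] at h
          injection h with h0
          subst h0
          rw [pvKept, if_pos ha]
          simp
        · rw [if_neg ha] at h
          cases hj : List.findIdx? pvIsBlockStart t with
          | none => rw [hj] at h; simp at h
          | some k =>
            rw [hj] at h
            simp at h
            subst h
            rw [pvKept, if_neg ha]
            have hk : k < t.length := by simpa using hlt
            simp only [List.take_succ_cons, List.drop_succ_cons, List.cons_append]
            rw [iht k hj hk]

-- the loop invariant: A's fold from skip=false appends pvFilterBad (pvKept ls),
-- from skip=true it appends pvFilterBad (pvKept (pvAfterTerminator ls))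
lemma pv_fold_eq : ∀ n (ls : List String), ls.length ≤ n →
    (∀ out : List String,
      (List.foldl pvStepA (out, false) ls).1 = out ++ pvFilterBad (pvKept ls)) ∧
    (∀ out : List String,
      (List.foldl pvStepA (out, true) ls).1 = out ++ pvFilterBad (pvKept (pvAfterTerminator ls))) := by
  intro n
  induction n with
  | zero =>
    intro ls hl
    have : ls = [] := List.eq_nil_of_length_eq_zero (Nat.le_zero.mp hl)
    subst this
    rw [pvKept]
    simp [pvAfterTerminator, pvKept, pvFilterBad]
  | succ m ih =>
    intro ls hl
    cases ls with
    | nil =>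
      rw [pvKept]
      simp [pvAfterTerminator, pvKept, pvFilterBad]
    | cons line rest =>
      have hr : rest.length ≤ m := by simpa using hl
      constructor <;> intro out <;> rw [List.foldl_cons, pvStepA_eq]
      · -- skip = false
        by_cases hs : pvIsBlockStart line = true
        · have hsplit : pvC1 line = true ∨ (pvC1 line = false ∧ pvC2 line = true) := by
            have := pv_start_eq line
            rw [hs] at this
            rcases Bool.or_eq_true_iff.mp this with h1 | h2
            · exact Or.inl h1
            · by_cases hc : pvC1 line = true
              · exact Or.inl hc
              · exact Or.inr ⟨Bool.eq_false_iff.mpr hc, h2⟩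
          have hgoal : (List.foldl pvStepA (out, true) rest).1
              = out ++ pvFilterBad (pvKept (line :: rest)) := by
            rw [pvKept, if_pos hs]
            exact (ih rest hr).2 out
          rcases hsplit with h1 | ⟨h1f, h2⟩
          · rw [if_pos h1]; exact hgoal
          · rw [h1f, if_neg (Bool.false_ne_true), if_pos h2]; exact hgoal
        · have h1 : ¬ pvC1 line = true := by
            intro hc
            exact hs (by rw [← pv_start_eq, hc]; rfl)
          have h2 : ¬ pvC2 line = true := by
            intro hc
            exact hs (by rw [← pv_start_eq, hc, Bool.or_true])
          rw [if_neg h1, if_neg h2, if_neg (Bool.false_ne_true)]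
          rw [pvKept, if_neg hs]
          by_cases hb : pvBad line = true
          · rw [if_pos hb]
            rw [(ih rest hr).1 out]
            congr 1
            simp [pvFilterBad, hb]
          · rw [if_neg hb]
            rw [(ih rest hr).1 (out ++ [line])]
            have : pvFilterBad (line :: pvKept rest) = line :: pvFilterBad (pvKept rest) := by
              simp [pvFilterBad, hb]
            rw [this, List.append_assoc]
            rfl
      · -- skip = true
        by_cases hs : pvIsBlockStart line = true
        · have hsplit : pvC1 line = true ∨ (pvC1 line = false ∧ pvC2 line = true) := by
            have := pv_start_eq line
            rw [hs] at this
            rcases Bool.or_eq_true_iff.mp this with h1 | h2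
            · exact Or.inl h1
            · by_cases hc : pvC1 line = true
              · exact Or.inl hc
              · exact Or.inr ⟨Bool.eq_false_iff.mpr hc, h2⟩
          have hterm : pvAfterTerminator (line :: rest) = pvAfterTerminator rest := by
            rw [pvAfterTerminator]
            simp [hs]
          have hgoal : (List.foldl pvStepA (out, true) rest).1
              = out ++ pvFilterBad (pvKept (pvAfterTerminator (line :: rest))) := by
            rw [hterm]
            exact (ih rest hr).2 out
          rcases hsplit with h1 | ⟨h1f, h2⟩
          · rw [if_pos h1]; exact hgoal
          · rw [h1f, if_neg (Bool.false_ne_true), if_pos h2]; exact hgoal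
        · have h1 : ¬ pvC1 line = true := by
            intro hc
            exact hs (by rw [← pv_start_eq, hc]; rfl)
          have h2 : ¬ pvC2 line = true := by
            intro hc
            exact hs (by rw [← pv_start_eq, hc, Bool.or_true])
          rw [if_neg h1, if_neg h2, if_pos rfl]
          have hsf : pvIsBlockStart line = false := Bool.eq_false_iff.mpr hs
          by_cases ht : pvIsTerminator line = true
          · rw [if_pos ht]
            have : pvAfterTerminator (line :: rest) = rest := by
              rw [pvAfterTerminator]
              simp [hsf, ht]
            rw [this]
            exact (ih rest hr).1 out
          · rw [if_neg ht]
            have : pvAfterTerminator (line :: rest) = pvAfterTerminator rest := by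
              rw [pvAfterTerminator]
              simp [Bool.eq_false_iff.mpr ht]
            rw [this]
            exact (ih rest hr).2 out

-- ===== VERDICT (by name: the statement is the Claim_ definition above) =====
theorem strip_css_artifacts_spec : Claim_equal_strip_css_artifacts := by
  intro text _
  show PySem.Str.join "\n" (List.foldl pvStepA ([], false) (PySem.Str.splitlines text)).1 ++ "\n"
      = strip_css_artifacts_alt text
  rw [(pv_fold_eq _ (PySem.Str.splitlines text) (Nat.le_refl _)).1 []]
  unfold strip_css_artifacts_alt
  rw [pvOutsideBlocks_eq _ (PySem.Str.splitlines text) (Nat.le_refl _) []]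
  rfl
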